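-- pv_equiv track=rewrite | github.com/LiuDongzhe/pythonProject | mahjong/rules.py | gangCheck
-- ===== SOURCE A (Python) =====
-- def gangCheck(hand):
--     # 杠牌检查
--     if len(hand) % 3 != 0:
--         return False
--
--     # 统计每种牌的数量
--     count = {}
--     for tile in hand:
--         if tile not in count:
--             count[tile] = 1
--         else:
--             count[tile] += 1
--
--     # 判断是否有四张相同的牌
--     for num in count.values():
--         if num == 4:
--             return True
--
--     return False
-- ===== SOURCE B (Python) =====
-- def gangCheck(hand):
--     # same guard as A; then a sort + run-length scan instead of a frequency dict:
--     # a tile occurs exactly four times iff some run in the sorted hand has length 4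
--     if len(hand) % 3 != 0:
--         return False
--     found = False
--     run = 0
--     prev = 0
--     for tile in sorted(hand):
--         if run > 0 and tile == prev:
--             run += 1
--         else:
--             if run == 4:
--                 found = True
--             run = 1
--             prev = tile
--     return found or run == 4
-- ===== Notes on version B (the rewrite author's own statement) =====
-- stated objective: alternative
-- what changed: Replaces A's frequency dict (build counts, then scan the values for 4) with a sort of the hand followed by a single run-length scan that flags a maximal run of length exactly 4.
import Mathlib
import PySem

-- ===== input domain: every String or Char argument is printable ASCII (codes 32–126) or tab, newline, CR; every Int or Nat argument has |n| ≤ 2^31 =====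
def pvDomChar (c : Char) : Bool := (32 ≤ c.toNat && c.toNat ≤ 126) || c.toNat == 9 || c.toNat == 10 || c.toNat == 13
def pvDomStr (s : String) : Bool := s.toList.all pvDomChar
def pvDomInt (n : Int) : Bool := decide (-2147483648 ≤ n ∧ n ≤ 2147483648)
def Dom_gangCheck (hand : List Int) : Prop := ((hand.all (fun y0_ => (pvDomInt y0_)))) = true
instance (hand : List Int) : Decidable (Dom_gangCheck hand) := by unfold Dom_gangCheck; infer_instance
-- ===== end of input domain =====

-- B replaces A's frequency dict with a sort of the hand plus one run-length scan flagging a maximal run of length exactly 4 (alternative algorithm, same cost).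


-- ===== PORT A =====
def gangCheck (hand : List Int) : Bool :=
  if hand.length % 3 ≠ 0 then false
  else
    let count := hand.foldl
      (fun (d : PySem.Dict Int Int) tile =>
        if d.contains tile = false then d.insert tile 1
        else d.modify tile 0 (· + 1))
      PySem.Dict.empty
    count.values.any (fun num => num == 4)

-- ===== PORT B =====
-- one step of B's run-length scan: state = (found, run, prev)
def bStep (st : Bool × Int × Int) (tile : Int) : Bool × Int × Int :=
  if st.2.1 > 0 && tile == st.2.2 then (st.1, st.2.1 + 1, st.2.2)
  else (st.1 || st.2.1 == 4, 1, tile)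

def gangCheck_alt (hand : List Int) : Bool :=
  if hand.length % 3 ≠ 0 then false
  else
    let st := (PySem.List.sorted hand (fun x => x) false).foldl bStep (false, 0, 0)
    st.1 || st.2.1 == 4

-- ===== PRECONDITION & SPEC =====
def Spec_gangCheck (hand : List Int) (out : Bool) : Prop := out = gangCheck_alt hand
instance (hand : List Int) (out : Bool) : Decidable (Spec_gangCheck hand out) := by unfold Spec_gangCheck; infer_instance

-- ===== CLAIM (what is proved, stated in full; the proofs are below) =====
def Claim_equal_gangCheck : Prop := ∀ (hand : List Int), Dom_gangCheck hand → Spec_gangCheck hand (gangCheck hand)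

-- ===== LEMMAS AND PROOFS =====

lemma fold_eq_counter (hand : List Int) :
    hand.foldl
      (fun (d : PySem.Dict Int Int) tile =>
        if d.contains tile = false then d.insert tile 1
        else d.modify tile 0 (· + 1))
      PySem.Dict.empty = PySem.Dict.counter hand := by
  rw [PySem.Dict.counter_eq_foldl]
  congr 1
  funext d x
  by_cases h : d.contains x = false
  · simp [h, PySem.Dict.modify, PySem.Dict.getD_of_not_contains d 0 h]
  · simp [Bool.of_not_eq_false h]

-- A's value: some distinct tile of the hand occurs exactly four times
lemma counter_values_any_eq (hand : List Int) :
    ((PySem.Dict.counter hand).values.any (fun num => num == 4))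
    = decide (∃ x ∈ hand, hand.count x = 4) := by
  rw [PySem.Dict.values_eq_map_keys _ (PySem.Dict.nodup_keys_counter hand) 0]
  simp only [PySem.Dict.keys_counter, List.any_map, PySem.Dict.getD_counter]
  apply Bool.eq_iff_iff.mpr
  simp only [List.any_eq_true, Function.comp, PySem.Set.mem_ofList, decide_eq_true_eq]
  constructor <;> rintro ⟨x, hx, h⟩ <;> exact ⟨x, hx, by simp [beq_iff_eq] at h ⊢; omega⟩

-- peeling a maximal run off a sorted (Pairwise ≤) list
lemma sorted_split (x : Int) (t : List Int) (h : (x :: t).Pairwise (· ≤ ·)) :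
    ∃ (k : Nat) (rest : List Int), x :: t = List.replicate (k + 1) x ++ rest ∧
      rest.Pairwise (· ≤ ·) ∧ (∀ y ∈ rest, x < y) := by
  induction t generalizing x with
  | nil => exact ⟨0, [], rfl, List.Pairwise.nil, by simp⟩
  | cons y t ih =>
    rcases List.pairwise_cons.mp h with ⟨hx, ht⟩
    by_cases hxy : x = y
    · subst hxy
      obtain ⟨k, rest, he, hp, hlt⟩ := ih x ht
      exact ⟨k + 1, rest, by simpa [List.replicate_succ] using congrArg (x :: ·) he, hp, hlt⟩
    · have hxy' : x < y := lt_of_le_of_ne (hx y (by simp)) hxy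
      refine ⟨0, y :: t, by simp, ht, ?_⟩
      intro z hz
      rcases List.mem_cons.mp hz with rfl | hz
      · exact hxy'
      · exact lt_of_lt_of_le hxy' ((List.pairwise_cons.mp ht).1 z hz)

lemma fold_replicate (k : Nat) (found : Bool) (run prev : Int) (hr : 0 < run) :
    (List.replicate k prev).foldl bStep (found, run, prev) = (found, run + k, prev) := by
  induction k generalizing run with
  | zero => norm_num
  | succ n ih =>
    rw [List.replicate_succ, List.foldl_cons]
    show List.foldl bStep (bStep (found, run, prev) prev) _ = _
    rw [show bStep (found, run, prev) prev = (found, run + 1, prev) by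
      simp [bStep]; omega]
    rw [ih (run + 1) (by omega)]
    have : run + 1 + (n : Int) = run + ((n + 1 : Nat) : Int) := by push_cast; ring
    rw [this]

-- run-length-scan invariant over a sorted tail whose elements all exceed prev
lemma scan_invariant (s : List Int) (hs : s.Pairwise (· ≤ ·)) :
    ∀ (found : Bool) (run prev : Int), 0 < run → (∀ y ∈ s, prev < y) →
    (let st := s.foldl bStep (found, run, prev); st.1 || st.2.1 == 4)
      = (found || decide (run = 4) || decide (∃ x ∈ s, s.count x = 4)) := by
  induction hn : s.length using Nat.strong_induction_on generalizing s with
  | _ n ih =>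
  intro found run prev hr hgt
  match s, hs with
  | [], _ => simp [Bool.beq_eq_decide_eq]
  | x :: t, hs =>
    obtain ⟨k, rest, he, hp, hlt⟩ := sorted_split x t hs
    have hpx : prev < x := hgt x (by simp)
    have hxrest : x ∉ rest := fun hm => absurd (hlt x hm) (lt_irrefl x)
    have hlen : rest.length < n := by
      have h1 := congrArg List.length he
      simp only [List.length_append, List.length_replicate, List.length_cons] at h1 hn
      omega
    have hstep : bStep (found, run, prev) x = (found || run == 4, 1, x) := by
      simp [bStep, hpx.ne']
    have hcount : (∃ y ∈ x :: t, (x :: t).count y = 4)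
        ↔ ((k : Int) + 1 = 4 ∨ ∃ y ∈ rest, rest.count y = 4) := by
      rw [he]
      constructor
      · rintro ⟨y, hy, hc⟩
        rcases List.mem_append.mp hy with hy | hy
        · left
          have : y = x := List.eq_of_mem_replicate hy
          subst this
          rw [List.count_append, List.count_replicate_self,
            List.count_eq_zero_of_not_mem hxrest] at hc
          omega
        · right
          refine ⟨y, hy, ?_⟩
          have hyx : y ≠ x := (hlt y hy).ne'
          rw [List.count_append, List.count_replicate] at hc
          simpa [Ne.symm hyx] using hc
      · rintro (hk | ⟨y, hy, hc⟩)
        · refine ⟨x, List.mem_append.mpr (Or.inl (by simp)), ?_⟩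
          rw [List.count_append, List.count_replicate_self,
            List.count_eq_zero_of_not_mem hxrest]
          omega
        · refine ⟨y, List.mem_append.mpr (Or.inr hy), ?_⟩
          have hyx : y ≠ x := (hlt y hy).ne'
          rw [List.count_append, List.count_replicate]
          simp [Ne.symm hyx, hc]
    show (let st := List.foldl bStep (found, run, prev) (x :: t); st.1 || st.2.1 == 4) = _
    rw [show x :: t = x :: (List.replicate k x ++ rest) by
        simpa [List.replicate_succ] using he]
    simp only [List.foldl_cons, hstep, List.foldl_append,
      fold_replicate k _ 1 x one_pos]
    rw [ih rest.length hlen rest hp rfl (found || run == 4) (1 + k) x (by positivity) hlt]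
    rw [show x :: (List.replicate k x ++ rest) = x :: t from by
      simpa [List.replicate_succ] using he.symm]
    rw [decide_eq_decide.mpr hcount]
    rw [show (1 : Int) + (k : Int) = (k : Int) + 1 from by ring]
    simp only [Bool.beq_eq_decide_eq, Bool.decide_or, Bool.or_assoc]
    infer_instance

theorem gangCheck_spec : Claim_equal_gangCheck := by
  intro hand _
  unfold Spec_gangCheck gangCheck gangCheck_alt
  by_cases h : hand.length % 3 ≠ 0
  · simp [h]
  · simp only [h, if_false, fold_eq_counter, counter_values_any_eq]
    have hperm : (PySem.List.sorted hand (fun x => x) false).Perm hand :=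
      PySem.List.sorted_perm hand (fun x => x) false
    have hmemcnt : decide (∃ x ∈ hand, hand.count x = 4)
        = decide (∃ x ∈ PySem.List.sorted hand (fun x => x) false,
            (PySem.List.sorted hand (fun x => x) false).count x = 4) := by
      apply decide_eq_decide.mpr
      constructor <;> rintro ⟨x, hx, hc⟩
      · exact ⟨x, hperm.mem_iff.mpr hx, by rw [hperm.count_eq]; exact hc⟩
      · exact ⟨x, hperm.mem_iff.mp hx, by rw [← hperm.count_eq]; exact hc⟩
    rw [hmemcnt]
    cases hsorted : PySem.List.sorted hand (fun x => x) false with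
    | nil => simp
    | cons x t =>
      have hpw : (x :: t).Pairwise (· ≤ ·) := by
        rw [← hsorted]; exact PySem.List.sorted_pairwise hand (fun x => x)
      have hfirst : List.foldl bStep (false, 0, 0) (x :: t)
          = List.foldl bStep (false, 1, x - 1) (x :: t) := by
        simp [List.foldl_cons, bStep, show ¬ x = x - 1 by omega]
      rw [hfirst,
        scan_invariant (x :: t) hpw false 1 (x - 1) one_pos
          (fun y hy => by
            have := List.pairwise_cons.mp hpw
            rcases List.mem_cons.mp hy with rfl | hy
            · omega
            · have := this.1 y hy; omega)]
      simp
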